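-- pv_equiv track=rewrite | github.com/tonioyeme/111 | strategy_statistical_test.py | max_consecutive_count
-- ===== SOURCE A (Python) =====
-- def max_consecutive_count(bool_array):
--     """计算最大连续True的个数"""
--     max_count = 0
--     current_count = 0
--     for val in bool_array:
--         if val:
--             current_count += 1
--             max_count = max(max_count, current_count)
--         else:
--             current_count = 0
--     return max_count
-- ===== SOURCE B (Python) =====
-- from itertools import groupby
--
-- def max_consecutive_count(bool_array):
--     """计算最大连续True的个数"""
--     return max((sum(1 for _ in g) for k, g in groupby(bool_array, key=bool) if k),
--                default=0)
-- ===== Notes on version B (the rewrite author's own statement) =====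
-- stated objective: idiomatic
-- what changed: Replaces the hand-threaded running/max counter pair with itertools.groupby: the array is split into maximal runs first and the answer is the max length over the True runs (default 0).
import Mathlib
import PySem

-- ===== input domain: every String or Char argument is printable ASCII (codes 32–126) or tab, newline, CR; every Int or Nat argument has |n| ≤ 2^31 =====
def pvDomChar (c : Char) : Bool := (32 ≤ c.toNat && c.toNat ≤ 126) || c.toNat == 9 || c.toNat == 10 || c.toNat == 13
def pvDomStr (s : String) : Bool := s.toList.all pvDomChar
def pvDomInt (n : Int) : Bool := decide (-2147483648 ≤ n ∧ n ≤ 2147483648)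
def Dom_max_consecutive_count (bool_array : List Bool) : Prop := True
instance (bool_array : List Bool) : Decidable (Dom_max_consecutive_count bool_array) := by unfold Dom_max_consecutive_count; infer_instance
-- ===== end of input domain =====

-- B replaces A's hand-threaded running/max counter pair with a groupby over maximal runs
-- (idiomatic decomposition, same O(n) cost).

-- ===== PORT A =====
-- A's for-loop threading (max_count, current_count), transliterated as structural recursion
-- over the same state.
def pvGoA (max_count current_count : Int) : List Bool → Int
  | [] => max_count
  | val :: rest =>
    if val then pvGoA (max max_count (current_count + 1)) (current_count + 1) rest
    else pvGoA max_count 0 rest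

def max_consecutive_count (bool_array : List Bool) : Int :=
  pvGoA 0 0 bool_array

-- ===== PORT B =====
-- itertools.groupby(bool_array, key=bool): the list of (key, run length) for maximal runs.
def pvGroups : List Bool → List (Bool × Int)
  | [] => []
  | x :: t =>
    (x, 1 + ((t.takeWhile (fun y => y == x)).length : Int)) ::
      pvGroups (t.dropWhile (fun y => y == x))
termination_by xs => xs.length
decreasing_by
  simpa using Nat.lt_succ_of_le (t.length_dropWhile_le (p := fun y => y == x))

-- max(<lengths of True groups>, default=0)
def max_consecutive_count_alt (bool_array : List Bool) : Int :=
  (pvGroups bool_array).foldl (fun acc p => if p.1 then max acc p.2 else acc) 0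

-- ===== PRECONDITION & SPEC =====
def Spec_max_consecutive_count (bool_array : List Bool) (out : Int) : Prop := out = max_consecutive_count_alt bool_array
instance (bool_array : List Bool) (out : Int) : Decidable (Spec_max_consecutive_count bool_array out) := by unfold Spec_max_consecutive_count; infer_instance

-- ===== CLAIM (what is proved, stated in full; the proofs are below) =====
def Claim_equal_max_consecutive_count : Prop := ∀ (bool_array : List Bool), Dom_max_consecutive_count bool_array → Spec_max_consecutive_count bool_array (max_consecutive_count bool_array)

-- ===== LEMMAS AND PROOFS =====

-- Best run length from a partial current run of length c onwards (proof-side abstraction).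
def pvRun (c : Int) : List Bool → Int
  | [] => 0
  | true :: t => max (c + 1) (pvRun (c + 1) t)
  | false :: t => pvRun 0 t

theorem pvGoA_eq_run : ∀ (t : List Bool) (m c : Int), 0 ≤ c → c ≤ m →
    pvGoA m c t = max m (pvRun c t) := by
  intro t
  induction t with
  | nil => intro m c hc hm; simp [pvGoA, pvRun]; omega
  | cons v t ih =>
    intro m c hc hm
    cases v with
    | true =>
      have h := ih (max m (c + 1)) (c + 1) (by omega) (by omega)
      simp only [pvGoA, pvRun, if_true]
      rw [h, max_assoc]
    | false =>
      simpa [pvGoA, pvRun] using ih m 0 le_rfl (by omega)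

theorem pvRun_true : ∀ (t : List Bool) (c : Int),
    pvRun c (true :: t) =
      max (c + 1 + ((t.takeWhile (fun y => y == true)).length : Int))
          (pvRun 0 (t.dropWhile (fun y => y == true))) := by
  intro t
  induction t with
  | nil => intro c; simp [pvRun]
  | cons v t ih =>
    intro c
    cases v with
    | true =>
      have h := ih (c + 1)
      simp only [pvRun] at h ⊢
      rw [h]
      simp only [List.takeWhile_cons, List.dropWhile_cons]
      norm_num
      omega
    | false =>
      simp only [pvRun, List.takeWhile_cons, List.dropWhile_cons]
      norm_num [pvRun]

theorem pvRun_skip_false : ∀ (t : List Bool),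
    pvRun 0 t = pvRun 0 (t.dropWhile (fun y => y == false)) := by
  intro t
  induction t with
  | nil => simp
  | cons v t ih =>
    cases v with
    | true => simp
    | false => simpa [pvRun, List.dropWhile_cons] using ih

theorem pvFold_groups : ∀ (xs : List Bool) (acc : Int), 0 ≤ acc →
    (pvGroups xs).foldl (fun acc p => if p.1 then max acc p.2 else acc) acc
      = max acc (pvRun 0 xs) := by
  intro xs
  induction xs using pvGroups.induct with
  | case1 => intro acc h; simp [pvGroups, pvRun]; omega
  | case2 x t ih =>
    intro acc hacc
    cases x with
    | true =>
      rw [pvGroups]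
      simp only [List.foldl_cons, if_true]
      rw [ih (max acc (1 + ((t.takeWhile (fun y => y == true)).length : Int)))
            (by positivity)]
      rw [pvRun_true]
      have h0 : (0 : Int) ≤ ((t.takeWhile (fun y => y == true)).length : Int) := by positivity
      omega
    | false =>
      rw [pvGroups]
      simp only [List.foldl_cons, if_neg (by simp : ¬ (false = true))]
      rw [ih acc hacc]
      have : pvRun 0 (false :: t) = pvRun 0 (t.dropWhile (fun y => y == false)) := by
        rw [show pvRun 0 (false :: t) = pvRun 0 t from rfl, pvRun_skip_false]
      rw [this]

-- ===== VERDICT (by name: the statement is the Claim_ definition above) =====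
theorem max_consecutive_count_spec : Claim_equal_max_consecutive_count := by
  intro xs _
  unfold Spec_max_consecutive_count max_consecutive_count max_consecutive_count_alt
  rw [pvGoA_eq_run xs 0 0 le_rfl le_rfl, pvFold_groups xs 0 le_rfl]
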